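-- pv_equiv track=rewrite | github.com/CorentinCLERO/concours_algo_grid | solvers/solver_dataset_2.py | greedy_joker_prepass
-- ===== SOURCE A (Python) =====
-- from typing import Dict, List, Sequence, Tuple
--
-- Action = Tuple[str, int, int, int, int, int]
--
-- Grid = List[List[int]]
--
-- def apply_action_in_place(grid: Grid, target: Grid, action: Action) -> None:
--     kind, x1, y1, x2, y2, color = action
--     if kind == "RECT":
--         for y in range(y1, y2 + 1):
--             row = grid[y]
--             for x in range(x1, x2 + 1):
--                 row[x] = color
--         return
--
--     for y in range(y1, y2 + 1):
--         row = grid[y]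
--         target_row = target[y]
--         for x in range(x1, x2 + 1):
--             row[x] = target_row[x]
--
-- def compute_gain_for_action(grid: Grid, target: Grid, action: Action) -> int:
--     kind, x1, y1, x2, y2, color = action
--     gain = 0
--
--     for y in range(y1, y2 + 1):
--         row = grid[y]
--         target_row = target[y]
--         for x in range(x1, x2 + 1):
--             before_ok = row[x] == target_row[x]
--             if kind == "RECT":
--                 after_val = color
--             else:
--                 after_val = target_row[x]
--             after_ok = after_val == target_row[x]
--             gain += int(after_ok) - int(before_ok)
--
--     return gain
--
-- def iter_all_joker_rectangles(width: int, height: int, max_area: int) -> List[Tuple[int, int, int, int]]: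
--     rects: List[Tuple[int, int, int, int]] = []
--     for y1 in range(height):
--         for y2 in range(y1, height):
--             rect_h = y2 - y1 + 1
--             for x1 in range(width):
--                 for x2 in range(x1, width):
--                     rect_w = x2 - x1 + 1
--                     if rect_w * rect_h <= max_area:
--                         rects.append((x1, y1, x2, y2))
--     return rects
--
-- def greedy_joker_prepass(
--     actions: List[Action],
--     grid: Grid,
--     target: Grid,
--     max_jokers: int,
--     max_joker_size: int,
-- ) -> int:
--     if max_jokers <= 0 or max_joker_size <= 0:
--         return 0
--
--     h = len(target)
--     w = len(target[0])
--     _ = h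
--     _ = w
--     used = 0
--     all_jokers = iter_all_joker_rectangles(len(target[0]), len(target), max_joker_size)
--
--     for _ in range(max_jokers):
--         best_action: Action = ("RECT", 0, 0, 0, 0, 0)
--         best_gain = 0
--         best_area = 0
--
--         for x1, y1, x2, y2 in all_jokers:
--             candidate: Action = ("JOKER", x1, y1, x2, y2, -1)
--             gain = compute_gain_for_action(grid, target, candidate)
--             area = (x2 - x1 + 1) * (y2 - y1 + 1)
--             if gain > best_gain or (gain == best_gain and area > best_area):
--                 best_gain = gain
--                 best_area = area
--                 best_action = candidate
--
--         if best_gain <= 1: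
--             break
--
--         actions.append(best_action)
--         apply_action_in_place(grid, target, best_action)
--         used += 1
--
--     return used
-- ===== SOURCE B (Python) =====
-- from typing import List, Tuple
--
-- Action = Tuple[str, int, int, int, int, int]
-- Grid = List[List[int]]
--
--
-- def greedy_joker_prepass(
--     actions: List[Action],
--     grid: Grid,
--     target: Grid,
--     max_jokers: int,
--     max_joker_size: int,
-- ) -> int:
--     if max_jokers <= 0 or max_joker_size <= 0:
--         return 0
--
--     h = len(target)
--     w = len(target[0])
--
--     # 0/1 mismatch matrix: the gain of a joker rectangle is just its mismatch count.
--     M = [[1 if grid[y][x] != target[y][x] else 0 for x in range(w)] for y in range(h)]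
--     rects = [(x1, y1, x2, y2)
--              for y1 in range(h) for y2 in range(y1, h)
--              for x1 in range(w) for x2 in range(x1, w)
--              if (x2 - x1 + 1) * (y2 - y1 + 1) <= max_joker_size]
--     used = 0
--
--     for _ in range(max_jokers):
--         # 2D prefix sums of M: a rectangle's gain is four lookups, no area scan.
--         P = [[sum(sum(row[:x]) for row in M[:y]) for x in range(w + 1)]
--              for y in range(h + 1)]
--
--         best_gain, best_area, best = 0, 0, None
--         for (x1, y1, x2, y2) in rects:
--             g = P[y2 + 1][x2 + 1] - P[y1][x2 + 1] - P[y2 + 1][x1] + P[y1][x1]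
--             a = (x2 - x1 + 1) * (y2 - y1 + 1)
--             if (g, a) > (best_gain, best_area):
--                 best_gain, best_area, best = g, a, (x1, y1, x2, y2)
--
--         if best_gain <= 1:
--             break
--
--         x1, y1, x2, y2 = best
--         actions.append(("JOKER", x1, y1, x2, y2, -1))
--         for y in range(y1, y2 + 1):
--             row = grid[y]
--             trow = target[y]
--             for x in range(x1, x2 + 1):
--                 row[x] = trow[x]
--         M = [[0 if y1 <= y <= y2 and x1 <= x <= x2 else v
--               for x, v in enumerate(mrow)] for y, mrow in enumerate(M)]
--         used += 1
--
--     return used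
-- ===== Notes on version B (the rewrite author's own statement) =====
-- stated objective: faster
-- what changed: B converts the grid/target pair once into a 0/1 mismatch matrix and, per greedy iteration, builds a full 2D prefix-sum table of it, so every candidate rectangle's gain is four table lookups instead of A's O(area) cell-by-cell rescan; picking the winner uses Python tuple comparison (gain, area) and applying it clears the rectangle in the mismatch matrix via comprehensions instead of re-deriving gains from the grid.
import Mathlib
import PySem

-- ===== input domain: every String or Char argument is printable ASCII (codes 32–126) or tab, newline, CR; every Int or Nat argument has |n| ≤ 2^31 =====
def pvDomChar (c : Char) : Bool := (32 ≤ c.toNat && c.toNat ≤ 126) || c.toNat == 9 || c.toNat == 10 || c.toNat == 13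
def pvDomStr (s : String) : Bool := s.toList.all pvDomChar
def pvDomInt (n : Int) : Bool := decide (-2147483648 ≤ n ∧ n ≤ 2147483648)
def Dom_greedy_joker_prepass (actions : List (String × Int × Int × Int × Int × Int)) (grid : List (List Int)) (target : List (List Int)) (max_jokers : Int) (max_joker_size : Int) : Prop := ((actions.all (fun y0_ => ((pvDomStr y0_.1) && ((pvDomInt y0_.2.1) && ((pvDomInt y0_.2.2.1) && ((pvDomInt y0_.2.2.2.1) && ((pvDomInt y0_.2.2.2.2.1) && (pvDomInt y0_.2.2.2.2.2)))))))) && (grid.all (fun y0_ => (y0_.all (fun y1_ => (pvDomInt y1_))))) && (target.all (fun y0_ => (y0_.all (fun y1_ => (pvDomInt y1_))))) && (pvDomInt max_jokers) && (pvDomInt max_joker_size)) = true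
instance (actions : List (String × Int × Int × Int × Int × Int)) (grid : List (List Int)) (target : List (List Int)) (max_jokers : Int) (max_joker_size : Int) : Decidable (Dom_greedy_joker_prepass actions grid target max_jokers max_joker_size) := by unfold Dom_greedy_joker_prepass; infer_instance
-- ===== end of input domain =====

-- B replaces A's per-candidate O(area) rectangle rescans by a 0/1 mismatch matrix with full 2D
-- prefix sums, so each candidate's gain is four table lookups (objective: faster). Equivalence is
-- about the RETURN value only: both Pythons also mutate `actions` and `grid` in place, identically;
-- the ports are purely functional.

-- ===== PORT A =====
def pvGetI (xs : List Int) (i : Int) : Int := PySem.List.pyGetD xs i 0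
def pvGetRow (g : List (List Int)) (i : Int) : List Int := PySem.List.pyGetD g i []

def apply_action_in_place (grid target : List (List Int)) (action : String × Int × Int × Int × Int × Int) : List (List Int) :=
  match action with
  | (kind, x1, y1, x2, y2, color) =>
    if kind == "RECT" then
      (PySem.List.pyRange y1 (y2 + 1) 1).foldl (fun g y =>
        let row := (PySem.List.pyRange x1 (x2 + 1) 1).foldl
          (fun r x => PySem.List.pySetD r x color) (pvGetRow g y)
        PySem.List.pySetD g y row) grid
    else
      (PySem.List.pyRange y1 (y2 + 1) 1).foldl (fun g y =>
        let target_row := pvGetRow target y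
        let row := (PySem.List.pyRange x1 (x2 + 1) 1).foldl
          (fun r x => PySem.List.pySetD r x (pvGetI target_row x)) (pvGetRow g y)
        PySem.List.pySetD g y row) grid

def compute_gain_for_action (grid target : List (List Int)) (action : String × Int × Int × Int × Int × Int) : Int :=
  match action with
  | (kind, x1, y1, x2, y2, color) =>
    (PySem.List.pyRange y1 (y2 + 1) 1).foldl (fun gain y =>
      let row := pvGetRow grid y
      let target_row := pvGetRow target y
      (PySem.List.pyRange x1 (x2 + 1) 1).foldl (fun gain x =>
        let before_ok := pvGetI row x == pvGetI target_row x
        let after_val := if kind == "RECT" then color else pvGetI target_row x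
        let after_ok := after_val == pvGetI target_row x
        gain + (if after_ok then 1 else 0) - (if before_ok then 1 else 0)) gain) 0

def iter_all_joker_rectangles (width height max_area : Int) : List (Int × Int × Int × Int) :=
  (PySem.List.pyRange 0 height 1).foldl (fun acc y1 =>
    (PySem.List.pyRange y1 height 1).foldl (fun acc y2 =>
      let rect_h := y2 - y1 + 1
      (PySem.List.pyRange 0 width 1).foldl (fun acc x1 =>
        (PySem.List.pyRange x1 width 1).foldl (fun acc x2 =>
          let rect_w := x2 - x1 + 1
          if rect_w * rect_h ≤ max_area then acc ++ [(x1, y1, x2, y2)] else acc) acc) acc) acc) []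

def greedyLoopA (all_jokers : List (Int × Int × Int × Int)) (target : List (List Int)) :
    Nat → List (List Int) → Int → Int
  | 0, _, used => used
  | n + 1, grid, used =>
    let st := all_jokers.foldl
      (fun (st : Int × Int × (String × Int × Int × Int × Int × Int)) r =>
        match r with
        | (x1, y1, x2, y2) =>
          let candidate : String × Int × Int × Int × Int × Int := ("JOKER", x1, y1, x2, y2, -1)
          let gain := compute_gain_for_action grid target candidate
          let area := (x2 - x1 + 1) * (y2 - y1 + 1)
          if st.1 < gain ∨ (gain = st.1 ∧ st.2.1 < area) then (gain, area, candidate) else st)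
      (0, 0, ("RECT", 0, 0, 0, 0, 0))
    if st.1 ≤ 1 then used
    else greedyLoopA all_jokers target n (apply_action_in_place grid target st.2.2) (used + 1)

def greedy_joker_prepass (actions : List (String × Int × Int × Int × Int × Int)) (grid : List (List Int)) (target : List (List Int)) (max_jokers : Int) (max_joker_size : Int) : Int :=
  if max_jokers ≤ 0 ∨ max_joker_size ≤ 0 then 0
  else
    let all_jokers := iter_all_joker_rectangles ((pvGetRow target 0).length : Int) (target.length : Int) max_joker_size
    greedyLoopA all_jokers target max_jokers.toNat grid 0

-- ===== PORT B =====
-- B's state is a 0/1 mismatch matrix; everything is a Nat-indexed comprehension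
-- (map/take/sum/enumerate), mirroring Source B's list comprehensions.
def mismatchM (grid target : List (List Int)) (h w : Nat) : List (List Int) :=
  (List.range h).map (fun y =>
    (List.range w).map (fun x =>
      if (grid.getD y []).getD x 0 ≠ (target.getD y []).getD x 0 then 1 else 0))

def rectsB (h w : Nat) (max_joker_size : Int) : List (Nat × Nat × Nat × Nat) :=
  (List.range h).flatMap (fun (y1 : Nat) =>
    (List.range' y1 (h - y1)).flatMap (fun (y2 : Nat) =>
      (List.range w).flatMap (fun (x1 : Nat) =>
        ((List.range' x1 (w - x1)).filter
            (fun (x2 : Nat) => decide (((x2 : Int) - (x1 : Int) + 1) * ((y2 : Int) - (y1 : Int) + 1) ≤ max_joker_size))).map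
          (fun (x2 : Nat) => (x1, y1, x2, y2)))))

def prefTable (M : List (List Int)) (h w : Nat) : List (List Int) :=
  (List.range (h + 1)).map (fun y =>
    (List.range (w + 1)).map (fun x =>
      ((M.take y).map (fun row => (row.take x).sum)).sum))

-- Python's lexicographic tuple comparison (g, a) > (bg, ba)
def pyGtPair (p q : Int × Int) : Bool := q.1 < p.1 || (p.1 == q.1 && q.2 < p.2)

def bestOf (P : List (List Int)) (rects : List (Nat × Nat × Nat × Nat)) :
    Int × Int × Option (Nat × Nat × Nat × Nat) :=
  rects.foldl
    (fun st r =>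
      match r with
      | (x1, y1, x2, y2) =>
        let g := (P.getD (y2 + 1) []).getD (x2 + 1) 0 - (P.getD y1 []).getD (x2 + 1) 0
            - (P.getD (y2 + 1) []).getD x1 0 + (P.getD y1 []).getD x1 0
        let a : Int := ((x2 : Int) - (x1 : Int) + 1) * ((y2 : Int) - (y1 : Int) + 1)
        if pyGtPair (g, a) (st.1, st.2.1) then (g, a, some (x1, y1, x2, y2)) else st)
    (0, 0, none)

def clearRect (M : List (List Int)) (x1 y1 x2 y2 : Nat) : List (List Int) :=
  (PySem.List.enumerate M 0).map (fun yr =>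
    (PySem.List.enumerate yr.2 0).map (fun xv =>
      if (y1 : Int) ≤ yr.1 ∧ yr.1 ≤ (y2 : Int) ∧ (x1 : Int) ≤ xv.1 ∧ xv.1 ≤ (x2 : Int)
      then 0 else xv.2))

def greedyLoopB (rects : List (Nat × Nat × Nat × Nat)) (h w : Nat) :
    Nat → List (List Int) → Int → Int
  | 0, _, used => used
  | n + 1, M, used =>
    let st := bestOf (prefTable M h w) rects
    if st.1 ≤ 1 then used
    else
      match st.2.2 with
      | some (x1, y1, x2, y2) => greedyLoopB rects h w n (clearRect M x1 y1 x2 y2) (used + 1)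
      | none => used  -- unreachable (best_gain > 1 forces a recorded best); totality default

def greedy_joker_prepass_alt (actions : List (String × Int × Int × Int × Int × Int)) (grid : List (List Int)) (target : List (List Int)) (max_jokers : Int) (max_joker_size : Int) : Int :=
  if max_jokers ≤ 0 ∨ max_joker_size ≤ 0 then 0
  else
    let h := target.length
    let w := (target.headD []).length
    greedyLoopB (rectsB h w max_joker_size) h w max_jokers.toNat (mismatchM grid target h w) 0

-- ===== PRECONDITION & SPEC =====
-- Pre_ excludes exactly the inputs where the Python raises: with positive budgets, A needs a
-- non-empty target (target[0]) and, unless target's rows are empty, a grid at least as tall as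
-- target whose first len(target) rows (and all target rows) are at least as wide as target[0].
def Pre_greedy_joker_prepass (actions : List (String × Int × Int × Int × Int × Int)) (grid : List (List Int)) (target : List (List Int)) (max_jokers : Int) (max_joker_size : Int) : Prop :=
  max_jokers ≤ 0 ∨ max_joker_size ≤ 0 ∨
    (target ≠ [] ∧
      ((pvGetRow target 0).length = 0 ∨
        (target.length ≤ grid.length ∧
          (∀ r ∈ target, (pvGetRow target 0).length ≤ r.length) ∧
          (∀ r ∈ grid.take target.length, (pvGetRow target 0).length ≤ r.length))))
instance (actions : List (String × Int × Int × Int × Int × Int)) (grid : List (List Int)) (target : List (List Int)) (max_jokers : Int) (max_joker_size : Int) : Decidable (Pre_greedy_joker_prepass actions grid target max_jokers max_joker_size) := by unfold Pre_greedy_joker_prepass; infer_instance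

def pvWitness_greedy_joker_prepass : (List (String × Int × Int × Int × Int × Int)) × List (List Int) × List (List Int) × Int × Int :=
  ([], [[0, 1], [1, 0]], [[1, 1], [1, 1]], 2, 4)

def Spec_greedy_joker_prepass (actions : List (String × Int × Int × Int × Int × Int)) (grid : List (List Int)) (target : List (List Int)) (max_jokers : Int) (max_joker_size : Int) (out : Int) : Prop := out = greedy_joker_prepass_alt actions grid target max_jokers max_joker_size
instance (actions : List (String × Int × Int × Int × Int × Int)) (grid : List (List Int)) (target : List (List Int)) (max_jokers : Int) (max_joker_size : Int) (out : Int) : Decidable (Spec_greedy_joker_prepass actions grid target max_jokers max_joker_size out) := by unfold Spec_greedy_joker_prepass; infer_instance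

-- ===== CLAIM (what is proved, stated in full; the proofs are below) =====
def Claim_equal_greedy_joker_prepass : Prop := ∀ (actions : List (String × Int × Int × Int × Int × Int)) (grid : List (List Int)) (target : List (List Int)) (max_jokers : Int) (max_joker_size : Int), Dom_greedy_joker_prepass actions grid target max_jokers max_joker_size → Pre_greedy_joker_prepass actions grid target max_jokers max_joker_size → Spec_greedy_joker_prepass actions grid target max_jokers max_joker_size (greedy_joker_prepass actions grid target max_jokers max_joker_size)

-- ===== LEMMAS AND PROOFS =====

theorem pvWitness_ok :
    Dom_greedy_joker_prepass (pvWitness_greedy_joker_prepass.1) (pvWitness_greedy_joker_prepass.2.1) (pvWitness_greedy_joker_prepass.2.2.1) (pvWitness_greedy_joker_prepass.2.2.2.1) (pvWitness_greedy_joker_prepass.2.2.2.2) ∧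
    Pre_greedy_joker_prepass (pvWitness_greedy_joker_prepass.1) (pvWitness_greedy_joker_prepass.2.1) (pvWitness_greedy_joker_prepass.2.2.1) (pvWitness_greedy_joker_prepass.2.2.2.1) (pvWitness_greedy_joker_prepass.2.2.2.2) := by
  decide

-- mismatch indicator of one cell, in A's vocabulary
def mind (g t : List Int) (x : Int) : Int := if pvGetI g x == pvGetI t x then 0 else 1

-- row mismatch count over columns 0..x-1, and block count over rows 0..y-1
def rowS (grid target : List (List Int)) (y x : Nat) : Int :=
  ((List.range x).map (fun (x' : Nat) => mind (pvGetRow grid (y : Int)) (pvGetRow target (y : Int)) (x' : Int))).sum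
def S2 (grid target : List (List Int)) (y x : Nat) : Int :=
  ((List.range y).map (fun y' => rowS grid target y' x)).sum

theorem head_eq (target : List (List Int)) : pvGetRow target 0 = target.headD [] := by
  have h0 : ((0 : Int)) = ((0 : Nat) : Int) := rfl
  unfold pvGetRow
  rw [h0, PySem.List.pyGetD_natCast]
  cases target <;> simp

theorem sum_map_sub' {α : Type} (l : List α) (f g : α → Int) :
    (l.map (fun x => f x - g x)).sum = (l.map f).sum - (l.map g).sum := by
  induction l with
  | nil => simp
  | cons a l ih => simp [ih]; ring

theorem range'_cast (a m : Nat) :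
    (List.range' a m).map (fun (k : Nat) => (k : Int))
      = (List.range m).map (fun (k : Nat) => ((a : Int) + (k : Int))) := by
  rw [List.range'_eq_map_range, List.map_map]
  apply List.map_congr_left
  intro k _
  simp only [Function.comp_apply]
  push_cast
  ring

theorem pyRange_natCast (a b : Nat) :
    PySem.List.pyRange (a : Int) (b : Int) 1
      = (List.range' a (b - a)).map (fun (k : Nat) => (k : Int)) := by
  rw [PySem.List.pyRange_one, range'_cast]
  have hn : ((b : Int) - (a : Int)).toNat = b - a := by omega
  rw [hn]

theorem pyRange_zero_cast (n : Nat) :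
    PySem.List.pyRange 0 (n : Int) 1 = (List.range n).map (fun (k : Nat) => (k : Int)) := by
  have h := pyRange_natCast 0 n
  simpa [List.range'_eq_map_range] using h

theorem sum_range_sub (f : Nat → Int) (a b : Nat) (hab : a ≤ b) :
    ((List.range b).map f).sum - ((List.range a).map f).sum
      = ((List.range' a (b - a)).map f).sum := by
  obtain ⟨m, rfl⟩ : ∃ m, b = a + m := ⟨b - a, by omega⟩
  simp only [Nat.add_sub_cancel_left, List.range_add, List.map_append, List.sum_append,
    List.range'_eq_map_range, List.map_map, Function.comp_def]
  ring

theorem getD_map_range' {α : Type} (f : Nat → α) (n k : Nat) (d : α) (hk : k < n) :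
    ((List.range n).map f).getD k d = f k := by
  have hl : k < ((List.range n).map f).length := by simpa using hk
  rw [List.getD_eq_getElem _ _ hl]
  simp

theorem prefT_get (grid target : List (List Int)) (h w y x : Nat) (hy : y ≤ h) (hx : x ≤ w) :
    ((prefTable (mismatchM grid target h w) h w).getD y []).getD x 0 = S2 grid target y x := by
  unfold prefTable
  rw [getD_map_range' _ _ y _ (by omega), getD_map_range' _ _ x _ (by omega)]
  unfold mismatchM S2
  rw [← List.map_take, List.take_range, Nat.min_eq_left hy, List.map_map]
  apply congrArg List.sum
  apply List.map_congr_left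
  intro y' _
  simp only [Function.comp_apply]
  rw [← List.map_take, List.take_range, Nat.min_eq_left hx]
  unfold rowS
  apply congrArg List.sum
  apply List.map_congr_left
  intro x' _
  simp only [mind, pvGetI, pvGetRow, PySem.List.pyGetD_natCast]
  simp

-- Σ-difference form of the block counts
theorem S2_diff (grid target : List (List Int)) (x y1 y2 : Nat) (hy : y1 ≤ y2 + 1) :
    S2 grid target (y2 + 1) x - S2 grid target y1 x
      = ((List.range' y1 (y2 + 1 - y1)).map (fun y' => rowS grid target y' x)).sum := by
  unfold S2
  exact sum_range_sub _ y1 (y2 + 1) hy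

theorem rowS_diff (grid target : List (List Int)) (y x1 x2 : Nat) (hx : x1 ≤ x2 + 1) :
    rowS grid target y (x2 + 1) - rowS grid target y x1
      = ((List.range' x1 (x2 + 1 - x1)).map
          (fun (x' : Nat) => mind (pvGetRow grid (y : Int)) (pvGetRow target (y : Int)) (x' : Int))).sum := by
  unfold rowS
  exact sum_range_sub _ x1 (x2 + 1) hx

-- A's joker gain as a nested sum of mismatch indicators
theorem compute_gain_joker (grid target : List (List Int)) (X1 Y1 X2 Y2 : Int) :
    compute_gain_for_action grid target ("JOKER", X1, Y1, X2, Y2, -1)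
      = ((PySem.List.pyRange Y1 (Y2 + 1) 1).map (fun y =>
          ((PySem.List.pyRange X1 (X2 + 1) 1).map
            (fun x => mind (pvGetRow grid y) (pvGetRow target y) x)).sum)).sum := by
  unfold compute_gain_for_action
  refine Eq.trans (PySem.List.foldl_congr_mem _ _
      (fun (s y : Int) => s + ((PySem.List.pyRange X1 (X2 + 1) 1).map
        (fun x => mind (pvGetRow grid y) (pvGetRow target y) x)).sum) _
      (fun acc y _ => ?_)) ?_
  · dsimp only
    have hb : (("JOKER" : String) == "RECT") = false := by decide
    refine Eq.trans (PySem.List.foldl_congr_mem _ _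
        (fun (s x : Int) => s + mind (pvGetRow grid y) (pvGetRow target y) x) _
        (fun a x _ => ?_)) ?_
    · dsimp only
      rw [hb]
      simp only [Bool.false_eq_true, if_false, beq_self_eq_true, if_true, mind]
      split <;> ring
    · rw [PySem.List.foldl_add]
  · rw [PySem.List.foldl_add]
    simp

theorem gain_eq (grid target : List (List Int)) (h w x1 y1 x2 y2 : Nat)
    (hx1 : x1 ≤ x2) (hx2 : x2 < w) (hy1 : y1 ≤ y2) (hy2 : y2 < h) :
    compute_gain_for_action grid target ("JOKER", (x1 : Int), (y1 : Int), (x2 : Int), (y2 : Int), -1)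
      = ((prefTable (mismatchM grid target h w) h w).getD (y2 + 1) []).getD (x2 + 1) 0
        - ((prefTable (mismatchM grid target h w) h w).getD y1 []).getD (x2 + 1) 0
        - ((prefTable (mismatchM grid target h w) h w).getD (y2 + 1) []).getD x1 0
        + ((prefTable (mismatchM grid target h w) h w).getD y1 []).getD x1 0 := by
  rw [compute_gain_joker,
    prefT_get grid target h w (y2 + 1) (x2 + 1) (by omega) (by omega),
    prefT_get grid target h w y1 (x2 + 1) (by omega) (by omega),
    prefT_get grid target h w (y2 + 1) x1 (by omega) (by omega),
    prefT_get grid target h w y1 x1 (by omega) (by omega)]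
  have harith : ∀ a b c d : Int, a - b - c + d = (a - b) - (c - d) := by intros; ring
  rw [harith, S2_diff grid target (x2 + 1) y1 y2 (by omega),
    S2_diff grid target x1 y1 y2 (by omega), ← sum_map_sub']
  have hy : ((y2 : Int) + 1) = ((y2 + 1 : Nat) : Int) := by push_cast; ring
  have hx : ((x2 : Int) + 1) = ((x2 + 1 : Nat) : Int) := by push_cast; ring
  rw [hy, hx, pyRange_natCast y1 (y2 + 1), pyRange_natCast x1 (x2 + 1), List.map_map]
  apply congrArg List.sum
  apply List.map_congr_left
  intro y' _
  simp only [Function.comp_apply]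
  rw [rowS_diff grid target y' x1 x2 (by omega), List.map_map]
  simp [Function.comp_def]

-- ---- pointwise characterisation of A's in-place joker write ----

theorem length_foldl_pySetD {α : Type} (L : List Int) (v : Int → List α → α) :
    ∀ r : List α, (L.foldl (fun r x => PySem.List.pySetD r x (v x r)) r).length = r.length := by
  induction L with
  | nil => intro r; rfl
  | cons a L ih => intro r; rw [List.foldl_cons, ih, PySem.List.length_pySetD]

theorem pyGetD_pySetD_char {α : Type} (r : List α) (i j : Int) (v : α) (d : α)
    (hi0 : 0 ≤ i) (hj0 : 0 ≤ j) (hjl : j < (r.length : Int)) :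
    PySem.List.pyGetD (PySem.List.pySetD r i v) j d
      = if j = i then v else PySem.List.pyGetD r j d := by
  have hi : i = ((i.toNat : Nat) : Int) := by omega
  have hj : j = ((j.toNat : Nat) : Int) := by omega
  have hjn : j.toNat < r.length := by omega
  rw [hi, hj, PySem.List.pySetD_natCast, PySem.List.pyGetD_natCast, PySem.List.pyGetD_natCast]
  by_cases hji : j.toNat = i.toNat
  · rw [if_pos (by exact_mod_cast hji), ← hji,
      List.getD_eq_getElem _ _ (by simpa using hjn)]
    simp
  · rw [if_neg (fun hc => hji (by exact_mod_cast hc)),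
      List.getD_eq_getElem _ _ (by simpa using hjn), List.getD_eq_getElem _ _ hjn]
    exact List.getElem_set_ne (by omega) (by simpa using hjn)

theorem foldl_pySetD_get (f : Int → Int) :
    ∀ (L : List Int), (∀ i ∈ L, 0 ≤ i) →
    ∀ (r : List Int) (j : Int), 0 ≤ j → j < (r.length : Int) →
      PySem.List.pyGetD (L.foldl (fun r x => PySem.List.pySetD r x (f x)) r) j 0
        = if j ∈ L then f j else PySem.List.pyGetD r j 0 := by
  intro L
  induction L with
  | nil => intro _ r j _ _; simp
  | cons i L ih =>
    intro hL r j hj0 hjl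
    have hi0 : 0 ≤ i := hL i List.mem_cons_self
    have hL' : ∀ x ∈ L, 0 ≤ x := fun x hx => hL x (List.mem_cons_of_mem _ hx)
    rw [List.foldl_cons,
      ih hL' _ j hj0 (by rw [PySem.List.length_pySetD]; exact hjl)]
    by_cases hjL : j ∈ L
    · simp [hjL]
    · rw [if_neg hjL, pyGetD_pySetD_char r i j (f i) 0 hi0 hj0 hjl]
      by_cases hji : j = i
      · simp [hji]
      · simp [hji, hjL, List.mem_cons]

theorem foldl_rowSet_get (F : Int → List Int → List Int) :
    ∀ (L : List Int), (∀ i ∈ L, 0 ≤ i) → L.Pairwise (· < ·) →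
    ∀ (g : List (List Int)) (j : Int), 0 ≤ j → j < (g.length : Int) →
      PySem.List.pyGetD (L.foldl (fun g y => PySem.List.pySetD g y (F y (PySem.List.pyGetD g y []))) g) j []
        = if j ∈ L then F j (PySem.List.pyGetD g j []) else PySem.List.pyGetD g j [] := by
  intro L
  induction L with
  | nil => intro _ _ g j _ _; simp
  | cons i L ih =>
    intro hL hP g j hj0 hjl
    have hi0 : 0 ≤ i := hL i List.mem_cons_self
    have hL' : ∀ x ∈ L, 0 ≤ x := fun x hx => hL x (List.mem_cons_of_mem _ hx)
    have hlt : ∀ z ∈ L, i < z := (List.pairwise_cons.mp hP).1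
    have hP' : L.Pairwise (· < ·) := (List.pairwise_cons.mp hP).2
    rw [List.foldl_cons,
      ih hL' hP' _ j hj0 (by rw [PySem.List.length_pySetD]; exact hjl)]
    have hset := pyGetD_pySetD_char g i j (F i (PySem.List.pyGetD g i [])) [] hi0 hj0 hjl
    by_cases hji : j = i
    · have hjL : j ∉ L := fun hmem => absurd (hlt j hmem) (by omega)
      rw [if_neg hjL, hset, if_pos hji, if_pos (by simp [hji]), hji]
    · by_cases hjL : j ∈ L
      · rw [if_pos hjL, if_pos (List.mem_cons_of_mem _ hjL), hset, if_neg hji]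
      · rw [if_neg hjL, hset, if_neg hji,
          if_neg (by simp [List.mem_cons, hji, hjL])]

-- the JOKER branch of apply_action_in_place, as a named function for the lemmas below
def writeJ (grid target : List (List Int)) (X1 Y1 X2 Y2 : Int) : List (List Int) :=
  (PySem.List.pyRange Y1 (Y2 + 1) 1).foldl (fun g y =>
    PySem.List.pySetD g y
      ((PySem.List.pyRange X1 (X2 + 1) 1).foldl
        (fun r x => PySem.List.pySetD r x (pvGetI (pvGetRow target y) x)) (PySem.List.pyGetD g y []))) grid

theorem apply_joker_eq (grid target : List (List Int)) (X1 Y1 X2 Y2 c : Int) :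
    apply_action_in_place grid target ("JOKER", X1, Y1, X2, Y2, c) = writeJ grid target X1 Y1 X2 Y2 := by
  have hb : (("JOKER" : String) == "RECT") = false := by decide
  simp only [apply_action_in_place, writeJ, hb, Bool.false_eq_true, if_false, pvGetRow]

theorem writeJ_length (grid target : List (List Int)) (X1 Y1 X2 Y2 : Int) :
    (writeJ grid target X1 Y1 X2 Y2).length = grid.length := by
  unfold writeJ; exact length_foldl_pySetD _ _ grid

theorem writeJ_row (grid target : List (List Int)) (x1 y1 x2 y2 : Nat) (y : Nat)
    (hy : y < grid.length) :
    (writeJ grid target (x1 : Int) (y1 : Int) (x2 : Int) (y2 : Int)).getD y []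
      = if (y1 : Int) ≤ (y : Int) ∧ (y : Int) ≤ (y2 : Int) then
          (PySem.List.pyRange (x1 : Int) ((x2 : Int) + 1) 1).foldl
            (fun r x => PySem.List.pySetD r x (pvGetI (pvGetRow target (y : Int)) x)) (grid.getD y [])
        else grid.getD y [] := by
  have hmem : ∀ i ∈ PySem.List.pyRange (y1 : Int) ((y2 : Int) + 1) 1, 0 ≤ i := by
    intro i hi
    have := PySem.List.mem_pyRange_one.mp hi
    omega
  have hch := foldl_rowSet_get
    (fun y row => (PySem.List.pyRange (x1 : Int) ((x2 : Int) + 1) 1).foldl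
      (fun r x => PySem.List.pySetD r x (pvGetI (pvGetRow target y) x)) row)
    (PySem.List.pyRange (y1 : Int) ((y2 : Int) + 1) 1) hmem
    (PySem.List.pairwise_lt_pyRange_one _ _) grid (y : Int) (by positivity) (by exact_mod_cast hy)
  have hL : (writeJ grid target (x1 : Int) (y1 : Int) (x2 : Int) (y2 : Int)).getD y []
      = PySem.List.pyGetD (writeJ grid target (x1 : Int) (y1 : Int) (x2 : Int) (y2 : Int)) (y : Int) [] := by
    rw [PySem.List.pyGetD_natCast]
  rw [hL]
  unfold writeJ
  rw [hch]
  by_cases hc : (y1 : Int) ≤ (y : Int) ∧ (y : Int) ≤ (y2 : Int)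
  · rw [if_pos (PySem.List.mem_pyRange_one.mpr (by omega)), if_pos hc,
      PySem.List.pyGetD_natCast]
  · rw [if_neg (fun hm => hc (by have := PySem.List.mem_pyRange_one.mp hm; omega)),
      if_neg hc, PySem.List.pyGetD_natCast]

theorem writeJ_getD (grid target : List (List Int)) (x1 y1 x2 y2 y x : Nat)
    (hy : y < grid.length) (hx : x < (grid.getD y []).length) :
    ((writeJ grid target (x1 : Int) (y1 : Int) (x2 : Int) (y2 : Int)).getD y []).getD x 0
      = if y1 ≤ y ∧ y ≤ y2 ∧ x1 ≤ x ∧ x ≤ x2 then (target.getD y []).getD x 0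
        else (grid.getD y []).getD x 0 := by
  rw [writeJ_row grid target x1 y1 x2 y2 y hy]
  have hmem : ∀ i ∈ PySem.List.pyRange (x1 : Int) ((x2 : Int) + 1) 1, 0 ≤ i := by
    intro i hi
    have := PySem.List.mem_pyRange_one.mp hi
    omega
  by_cases hyc : y1 ≤ y ∧ y ≤ y2
  · rw [if_pos (by exact_mod_cast hyc)]
    have hget : ((PySem.List.pyRange (x1 : Int) ((x2 : Int) + 1) 1).foldl
        (fun r x => PySem.List.pySetD r x (pvGetI (pvGetRow target (y : Int)) x))
        (grid.getD y [])).getD x 0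
        = PySem.List.pyGetD ((PySem.List.pyRange (x1 : Int) ((x2 : Int) + 1) 1).foldl
            (fun r x => PySem.List.pySetD r x (pvGetI (pvGetRow target (y : Int)) x))
            (grid.getD y [])) (x : Int) 0 := by rw [PySem.List.pyGetD_natCast]
    rw [hget, foldl_pySetD_get _ _ hmem _ (x : Int) (by positivity) (by exact_mod_cast hx)]
    by_cases hxc : x1 ≤ x ∧ x ≤ x2
    · rw [if_pos (PySem.List.mem_pyRange_one.mpr (by omega)),
        if_pos (by exact ⟨hyc.1, hyc.2, hxc.1, hxc.2⟩)]
      simp [pvGetI, pvGetRow]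
    · rw [if_neg (fun hm => hxc (by have := PySem.List.mem_pyRange_one.mp hm; omega)),
        if_neg (by intro hall; exact hxc ⟨hall.2.2.1, hall.2.2.2⟩), PySem.List.pyGetD_natCast]
  · rw [if_neg (by intro hc; exact hyc ⟨by exact_mod_cast hc.1, by exact_mod_cast hc.2⟩),
      if_neg (by intro hall; exact hyc ⟨hall.1, hall.2.1⟩)]

theorem writeJ_row_len (grid target : List (List Int)) (x1 y1 x2 y2 y : Nat)
    (hy : y < grid.length) :
    ((writeJ grid target (x1 : Int) (y1 : Int) (x2 : Int) (y2 : Int)).getD y []).length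
      = (grid.getD y []).length := by
  rw [writeJ_row grid target x1 y1 x2 y2 y hy]
  split
  · exact length_foldl_pySetD _ _ _
  · rfl

-- ---- clearRect on a comprehension-built matrix ----
theorem clearRect_map (e : Nat → Nat → Int) (h w x1 y1 x2 y2 : Nat) :
    clearRect ((List.range h).map (fun y => (List.range w).map (e y))) x1 y1 x2 y2
      = (List.range h).map (fun y => (List.range w).map (fun x =>
          if y1 ≤ y ∧ y ≤ y2 ∧ x1 ≤ x ∧ x ≤ x2 then 0 else e y x)) := by
  apply List.ext_getElem
  · simp [clearRect, PySem.List.length_enumerate]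
  · intro n h1 h2
    simp only [clearRect, List.getElem_map, PySem.List.getElem_enumerate, List.getElem_range]
    have hn : n < h := by simpa [clearRect, PySem.List.length_enumerate] using h1
    apply List.ext_getElem
    · simp [PySem.List.length_enumerate]
    · intro k k1 k2
      simp only [List.getElem_map, PySem.List.getElem_enumerate, List.getElem_range]
      have hk : k < w := by simpa using k2
      by_cases hc : y1 ≤ n ∧ n ≤ y2 ∧ x1 ≤ k ∧ k ≤ x2
      · rw [if_pos (by omega), if_pos hc]
      · rw [if_neg (by omega), if_neg hc]

-- after A writes the joker rectangle, the mismatch matrix is the cleared one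
theorem step_eq (grid target : List (List Int)) (h w x1 y1 x2 y2 : Nat)
    (hg : h ≤ grid.length) (hgw : ∀ j, j < h → w ≤ (grid.getD j []).length) :
    clearRect (mismatchM grid target h w) x1 y1 x2 y2
      = mismatchM (writeJ grid target (x1 : Int) (y1 : Int) (x2 : Int) (y2 : Int)) target h w := by
  unfold mismatchM
  rw [clearRect_map]
  apply List.map_congr_left
  intro y hy
  apply List.map_congr_left
  intro x hx
  have hyh : y < h := List.mem_range.mp hy
  have hxw : x < w := List.mem_range.mp hx
  rw [writeJ_getD grid target x1 y1 x2 y2 y x (by omega) (by have := hgw y hyh; omega)]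
  by_cases hc : y1 ≤ y ∧ y ≤ y2 ∧ x1 ≤ x ∧ x ≤ x2
  · rw [if_pos hc, if_pos hc]
    simp
  · rw [if_neg hc, if_neg hc]

-- ---- rectangle list correspondence ----
theorem iter_eq_map (h w : Nat) (ms : Int) :
    iter_all_joker_rectangles (w : Int) (h : Int) ms
      = (rectsB h w ms).map (fun r => ((r.1 : Int), (r.2.1 : Int), (r.2.2.1 : Int), (r.2.2.2 : Int))) := by
  unfold iter_all_joker_rectangles rectsB
  simp only [PySem.List.foldl_append_ite, PySem.List.foldl_append_eq_flatMap, List.nil_append,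
    pyRange_zero_cast, pyRange_natCast, List.flatMap_map, List.map_flatMap, List.filter_map,
    List.map_map, Function.comp_def]

theorem mem_rectsB (h w : Nat) (ms : Int) (r : Nat × Nat × Nat × Nat) (hr : r ∈ rectsB h w ms) :
    r.2.1 ≤ r.2.2.2 ∧ r.2.2.2 < h ∧ r.1 ≤ r.2.2.1 ∧ r.2.2.1 < w := by
  obtain ⟨x1, y1, x2, y2⟩ := r
  simp only [rectsB, List.mem_flatMap, List.mem_map, List.mem_filter, List.mem_range,
    List.mem_range'_1] at hr
  obtain ⟨y1', hy1, y2', hy2, x1', hx1, x2', hx2, heq⟩ := hr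
  simp only [Prod.mk.injEq] at heq
  obtain ⟨e1, e2, e3, e4⟩ := heq
  subst e1; subst e2; subst e3; subst e4
  dsimp only
  refine ⟨?_, ?_, ?_, ?_⟩ <;> omega

-- ---- best-candidate fold correspondence ----
def RelB (h w : Nat) (ms : Int) (a : Int × Int × (String × Int × Int × Int × Int × Int))
    (b : Int × Int × Option (Nat × Nat × Nat × Nat)) : Prop :=
  a.1 = b.1 ∧ a.2.1 = b.2.1 ∧
    ((∃ r, b.2.2 = some r ∧ r ∈ rectsB h w ms ∧
        a.2.2 = ("JOKER", (r.1 : Int), (r.2.1 : Int), (r.2.2.1 : Int), (r.2.2.2 : Int), -1))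
      ∨ (a = (0, 0, ("RECT", 0, 0, 0, 0, 0)) ∧ b.2.2 = none))

theorem foldl_rel' {α γ δ : Type} (R : γ → δ → Prop) (L : List α) (f : γ → α → γ) (g : δ → α → δ)
    (h : ∀ x ∈ L, ∀ c d, R c d → R (f c x) (g d x)) :
    ∀ {c : γ} {d : δ}, R c d → R (L.foldl f c) (L.foldl g d) := by
  induction L with
  | nil => intro c d h0; exact h0
  | cons a L ih =>
    intro c d h0
    exact ih (fun x hx => h x (List.mem_cons_of_mem _ hx)) (h a List.mem_cons_self c d h0)

theorem best_rel (grid target : List (List Int)) (h w : Nat) (ms : Int) :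
    RelB h w ms
      ((iter_all_joker_rectangles (w : Int) (h : Int) ms).foldl
        (fun (st : Int × Int × (String × Int × Int × Int × Int × Int)) r =>
          match r with
          | (x1, y1, x2, y2) =>
            let candidate : String × Int × Int × Int × Int × Int := ("JOKER", x1, y1, x2, y2, -1)
            let gain := compute_gain_for_action grid target candidate
            let area := (x2 - x1 + 1) * (y2 - y1 + 1)
            if st.1 < gain ∨ (gain = st.1 ∧ st.2.1 < area) then (gain, area, candidate) else st)
        (0, 0, ("RECT", 0, 0, 0, 0, 0)))
      (bestOf (prefTable (mismatchM grid target h w) h w) (rectsB h w ms)) := by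
  rw [iter_eq_map, List.foldl_map]
  unfold bestOf
  refine foldl_rel' (RelB h w ms) (rectsB h w ms) _ _ ?_ ⟨rfl, rfl, Or.inr ⟨rfl, rfl⟩⟩
  intro r hr a b hab
  obtain ⟨x1, y1, x2, y2⟩ := r
  obtain ⟨hby, hy2, hbx, hx2⟩ := mem_rectsB h w ms _ hr
  obtain ⟨h1, h2, h3⟩ := hab
  dsimp only
  rw [gain_eq grid target h w x1 y1 x2 y2 hbx hx2 hby hy2]
  have hbool : (pyGtPair
      (((prefTable (mismatchM grid target h w) h w).getD (y2 + 1) []).getD (x2 + 1) 0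
        - ((prefTable (mismatchM grid target h w) h w).getD y1 []).getD (x2 + 1) 0
        - ((prefTable (mismatchM grid target h w) h w).getD (y2 + 1) []).getD x1 0
        + ((prefTable (mismatchM grid target h w) h w).getD y1 []).getD x1 0,
        ((x2 : Int) - (x1 : Int) + 1) * ((y2 : Int) - (y1 : Int) + 1)) (b.1, b.2.1) = true)
      ↔ (a.1 < (((prefTable (mismatchM grid target h w) h w).getD (y2 + 1) []).getD (x2 + 1) 0
        - ((prefTable (mismatchM grid target h w) h w).getD y1 []).getD (x2 + 1) 0
        - ((prefTable (mismatchM grid target h w) h w).getD (y2 + 1) []).getD x1 0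
        + ((prefTable (mismatchM grid target h w) h w).getD y1 []).getD x1 0)
        ∨ ((((prefTable (mismatchM grid target h w) h w).getD (y2 + 1) []).getD (x2 + 1) 0
        - ((prefTable (mismatchM grid target h w) h w).getD y1 []).getD (x2 + 1) 0
        - ((prefTable (mismatchM grid target h w) h w).getD (y2 + 1) []).getD x1 0
        + ((prefTable (mismatchM grid target h w) h w).getD y1 []).getD x1 0) = a.1
          ∧ a.2.1 < ((x2 : Int) - (x1 : Int) + 1) * ((y2 : Int) - (y1 : Int) + 1))) := by
    simp [pyGtPair, h1, h2]
  by_cases hc : a.1 < (((prefTable (mismatchM grid target h w) h w).getD (y2 + 1) []).getD (x2 + 1) 0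
        - ((prefTable (mismatchM grid target h w) h w).getD y1 []).getD (x2 + 1) 0
        - ((prefTable (mismatchM grid target h w) h w).getD (y2 + 1) []).getD x1 0
        + ((prefTable (mismatchM grid target h w) h w).getD y1 []).getD x1 0)
        ∨ ((((prefTable (mismatchM grid target h w) h w).getD (y2 + 1) []).getD (x2 + 1) 0
        - ((prefTable (mismatchM grid target h w) h w).getD y1 []).getD (x2 + 1) 0
        - ((prefTable (mismatchM grid target h w) h w).getD (y2 + 1) []).getD x1 0
        + ((prefTable (mismatchM grid target h w) h w).getD y1 []).getD x1 0) = a.1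
          ∧ a.2.1 < ((x2 : Int) - (x1 : Int) + 1) * ((y2 : Int) - (y1 : Int) + 1))
  · rw [if_pos hc, if_pos (hbool.mpr hc)]
    exact ⟨rfl, rfl, Or.inl ⟨(x1, y1, x2, y2), rfl, hr, rfl⟩⟩
  · rw [if_neg hc, if_neg (fun hb => hc (hbool.mp hb))]
    exact ⟨h1, h2, h3⟩

-- ---- the greedy loops agree ----
theorem loop_eq (target : List (List Int)) (ms : Int) (h w : Nat) (hh : h = target.length) :
    ∀ (n : Nat) (grid M : List (List Int)) (used : Int),
      (w = 0 ∨ (h ≤ grid.length ∧ ∀ j, j < h → w ≤ (grid.getD j []).length)) →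
      M = mismatchM grid target h w →
      greedyLoopA (iter_all_joker_rectangles (w : Int) (h : Int) ms) target n grid used
        = greedyLoopB (rectsB h w ms) h w n M used := by
  intro n
  induction n with
  | zero => intro grid M used _ _; rfl
  | succ n ih =>
    intro grid M used hbound hM
    subst hM
    simp only [greedyLoopA, greedyLoopB]
    obtain ⟨h1, h2, h3⟩ := best_rel grid target h w ms
    rw [h1]
    by_cases hbr : (bestOf (prefTable (mismatchM grid target h w) h w) (rectsB h w ms)).1 ≤ 1
    · rw [if_pos hbr, if_pos hbr]
    · rw [if_neg hbr, if_neg hbr]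
      rcases h3 with ⟨r, hsome, hmem, hcand⟩ | ⟨ha, hnone⟩
      · obtain ⟨x1, y1, x2, y2⟩ := r
        obtain ⟨hby, hy2, hbx, hx2⟩ := mem_rectsB h w ms _ hmem
        rcases hbound with h0 | ⟨hgl, hgw⟩
        · omega
        · rw [hsome, hcand, apply_joker_eq]
          exact ih (writeJ grid target (x1 : Int) (y1 : Int) (x2 : Int) (y2 : Int)) _ (used + 1)
            (Or.inr ⟨by rw [writeJ_length]; exact hgl,
              fun j hj => by
                rw [writeJ_row_len grid target x1 y1 x2 y2 j (by omega)]
                exact hgw j hj⟩)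
            (step_eq grid target h w x1 y1 x2 y2 hgl hgw)
      · exfalso
        rw [ha] at h1
        simp at h1
        omega

-- ===== VERDICT (by name: the statement is the Claim_ definition above) =====
theorem greedy_joker_prepass_spec : Claim_equal_greedy_joker_prepass := by
  intro actions grid target mj ms _ hpre
  by_cases hg : mj ≤ 0 ∨ ms ≤ 0
  · simp [Spec_greedy_joker_prepass, greedy_joker_prepass, greedy_joker_prepass_alt, hg]
  · simp only [Spec_greedy_joker_prepass, greedy_joker_prepass, greedy_joker_prepass_alt,
      if_neg hg]
    rw [head_eq]
    refine loop_eq target ms target.length (target.headD []).length rfl mj.toNat grid _ 0 ?_ rfl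
    rcases hpre with h | h | ⟨hne, hcase⟩
    · exact absurd (Or.inl h) hg
    · exact absurd (Or.inr h) hg
    · rcases hcase with hw0 | ⟨hlen, htw, hgw⟩
      · left; rw [← head_eq]; exact hw0
      · right
        refine ⟨hlen, fun j hj => ?_⟩
        rw [← head_eq]
        have hjg : j < grid.length := lt_of_lt_of_le hj hlen
        rw [List.getD_eq_getElem _ _ hjg]
        apply hgw
        have hmt : (grid.take target.length)[j]'(by simp; omega) = grid[j] :=
          List.getElem_take
        rw [← hmt]
        exact List.getElem_mem _
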